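-- pv_equiv track=rewrite | github.com/Mihailo2903/Projekti | ASP 1/Domaci 1/dzp2.py | proveri
-- ===== SOURCE A (Python) =====
-- def proveri(s):
--     brojac=0
--     for i in range(len(s)):
--         if s[i]=="+" or s[i]=="-" or s[i]=="/" or s[i]=="*":
--             brojac=brojac-2
--             if brojac<0:
--                 return False
--             brojac+=1
--         elif s[i].isupper():
--             brojac = brojac + 1
--         else:
--             return False
--     if brojac==1:
--         return True
--     return  False
-- ===== SOURCE B (Python) =====
-- def proveri(s):
--     # Reverse: a valid postfix string of single-char operands reads as a
--     # valid prefix expression; parse it by recursive descent E -> UPPER | OP E E.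
--     t = s[::-1]
--
--     def parse(i):
--         # parse one expression starting at i; return index after it, or None
--         if i >= len(t):
--             return None
--         c = t[i]
--         if c == "+" or c == "-" or c == "/" or c == "*":
--             j = parse(i + 1)
--             if j is None:
--                 return None
--             return parse(j)
--         if c.isupper():
--             return i + 1
--         return None
--
--     return parse(0) == len(t)
-- ===== Notes on version B (the rewrite author's own statement) =====
-- stated objective: alternative
-- what changed: A scans left-to-right keeping an operator/operand counter; B reverses the string and runs a recursive-descent parser for the grammar E -> UPPERCASE | OP E E, accepting iff exactly one expression consumes the whole reversed string.
import Mathlib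
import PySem

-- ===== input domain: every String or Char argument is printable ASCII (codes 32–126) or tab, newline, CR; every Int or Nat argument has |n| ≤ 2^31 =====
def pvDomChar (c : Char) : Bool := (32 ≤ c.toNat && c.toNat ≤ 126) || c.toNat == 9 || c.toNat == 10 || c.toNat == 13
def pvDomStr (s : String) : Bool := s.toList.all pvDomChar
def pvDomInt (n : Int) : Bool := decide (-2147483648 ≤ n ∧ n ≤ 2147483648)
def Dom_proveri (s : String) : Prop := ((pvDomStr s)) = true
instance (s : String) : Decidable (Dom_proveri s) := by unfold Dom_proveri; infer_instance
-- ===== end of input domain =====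

-- B replaces A's operator/operand counter scan by reversing the string and running a
-- recursive-descent parser for the prefix grammar E -> UPPER | OP E E (objective: alternative).

-- ===== PORT A =====
-- A's loop over range(len(s)) with counter `brojac` and early `return False`
def proveriLoop : List Char → Int → Bool
  | [], brojac => brojac == 1
  | c :: rest, brojac =>
    if c == '+' || c == '-' || c == '/' || c == '*' then
      -- brojac = brojac - 2; if brojac < 0: return False; brojac += 1
      if brojac - 2 < 0 then false else proveriLoop rest (brojac - 2 + 1)
    else if PySem.Chars.isupper c then
      proveriLoop rest (brojac + 1)
    else
      false

def proveri (s : String) : Bool := proveriLoop s.toList 0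

-- ===== PORT B =====
-- Source B's parse(i) over t = s[::-1]; the remaining suffix plays the role of the index i,
-- `some r` = parse returned the position whose suffix is r, `none` = parse returned None.
-- The fuel argument only makes the recursion structural; Source B's recursion depth is bounded
-- by len(t), so fuel = length + 1 never runs out (lemma parseB_expr below).
def parseB : Nat → List Char → Option (List Char)
  | 0, _ => none
  | _ + 1, [] => none                         -- i >= len(t)
  | fuel + 1, c :: rest =>
    if c == '+' || c == '-' || c == '/' || c == '*' then
      match parseB fuel rest with
      | none => none
      | some j => parseB fuel j
    else if PySem.Chars.isupper c then
      some rest                               -- return i + 1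
    else
      none

def proveri_alt (s : String) : Bool :=
  let t := s.toList.reverse
  parseB (t.length + 1) t == some []          -- parse(0) == len(t)

-- ===== PRECONDITION & SPEC =====
def Spec_proveri (s : String) (out : Bool) : Prop := out = proveri_alt s
instance (s : String) (out : Bool) : Decidable (Spec_proveri s out) := by unfold Spec_proveri; infer_instance

-- ===== CLAIM (what is proved, stated in full; the proofs are below) =====
def Claim_equal_proveri : Prop := ∀ (s : String), Dom_proveri s → Spec_proveri s (proveri s)

-- ===== LEMMAS AND PROOFS =====

/-- operator test, shared shape of both ports' first branch -/
def pvIsOp (c : Char) : Bool := c == '+' || c == '-' || c == '/' || c == '*'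

/-- weight of a char: operand +1, operator -1 (stack effect in postfix reading) -/
def pvWt (c : Char) : Int := if pvIsOp c then -1 else 1

def pvSum (cs : List Char) : Int := (cs.map pvWt).sum

/-- a char both ports accept -/
def pvOk (c : Char) : Bool := pvIsOp c || PySem.Chars.isupper c

/-- well-formed prefix expressions over single uppercase operands -/
inductive PExpr : List Char → Prop
  | up {c : Char} : pvIsOp c = false → PySem.Chars.isupper c = true → PExpr [c]
  | op {c : Char} {e1 e2 : List Char} : pvIsOp c = true → PExpr e1 → PExpr e2 →
      PExpr (c :: e1 ++ e2)

/-- counting criterion on a list read as prefix (suffix sums) -/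
def Crit (t : List Char) : Prop :=
  (∀ c ∈ t, pvOk c = true) ∧ (∀ q, q <:+ t → q ≠ [] → 1 ≤ pvSum q) ∧ pvSum t = 1

theorem pvSum_nil : pvSum [] = 0 := rfl

theorem pvSum_cons (c : Char) (l : List Char) : pvSum (c :: l) = pvWt c + pvSum l := by
  simp [pvSum]

theorem pvSum_append (l1 l2 : List Char) : pvSum (l1 ++ l2) = pvSum l1 + pvSum l2 := by
  simp [pvSum]

theorem pvSum_reverse (l : List Char) : pvSum l.reverse = pvSum l := by
  simp [pvSum]

-- ---------- B side: parseB ↔ PExpr ----------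

theorem parseB_sound : ∀ (fuel : Nat) (t r : List Char), parseB fuel t = some r →
    ∃ e, PExpr e ∧ t = e ++ r := by
  intro fuel
  induction fuel with
  | zero => intro t r h; simp [parseB] at h
  | succ fuel ih =>
    intro t r h
    match t with
    | [] => simp [parseB] at h
    | c :: rest =>
      by_cases hop : (c == '+' || c == '-' || c == '/' || c == '*') = true
      · simp only [parseB, hop, if_pos] at h
        cases hj : parseB fuel rest with
        | none => rw [hj] at h; simp at h
        | some j =>
          rw [hj] at h; simp only at h
          obtain ⟨e1, he1, hrest⟩ := ih rest j hj
          obtain ⟨e2, he2, hj2⟩ := ih j r h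
          refine ⟨c :: e1 ++ e2, PExpr.op (by simpa [pvIsOp] using hop) he1 he2, ?_⟩
          simp [hrest, hj2]
      · by_cases hup : PySem.Chars.isupper c = true
        · simp [parseB, hop, hup] at h
          exact ⟨[c], PExpr.up (by simpa [pvIsOp] using hop) hup, by simp [h]⟩
        · simp [parseB, hop, hup] at h

theorem parseB_complete : ∀ (e : List Char), PExpr e → ∀ (r : List Char) (fuel : Nat),
    e.length ≤ fuel → parseB fuel (e ++ r) = some r := by
  intro e he
  induction he with
  | up hop hup =>
    intro r fuel hf
    match fuel, hf with
    | fuel + 1, _ =>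
      simp [parseB, show ¬((_ == '+' || _ == '-' || _ == '/' || _ == '*') = true) from by
        simpa [pvIsOp] using hop, hup]
  | @op c e1 e2 hop _ _ ih1 ih2 =>
    intro r fuel hf
    match fuel, hf with
    | fuel + 1, hf =>
      have h1 : e1.length ≤ fuel := by simp at hf; omega
      have h2 : e2.length ≤ fuel := by simp at hf; omega
      have hopb : (c == '+' || c == '-' || c == '/' || c == '*') = true := by
        simpa [pvIsOp] using hop
      simp only [List.cons_append, List.append_assoc, parseB, hopb, if_pos]
      rw [ih1 (e2 ++ r) fuel h1]
      exact ih2 r fuel h2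

theorem parseB_iff_PExpr (t : List Char) :
    parseB (t.length + 1) t = some [] ↔ PExpr t := by
  constructor
  · intro h
    obtain ⟨e, he, ht⟩ := parseB_sound _ _ _ h
    simpa [ht] using he
  · intro h
    have := parseB_complete t h [] (t.length + 1) (by omega)
    simpa using this

-- ---------- PExpr ↔ Crit ----------

theorem PExpr_crit : ∀ (t : List Char), PExpr t → Crit t := by
  intro t ht
  induction ht with
  | @up c hop hup =>
    refine ⟨by simp [pvOk, hup], ?_, by simp [pvSum_cons, pvSum_nil, pvWt, hop]⟩
    intro q hq hne
    rcases List.suffix_cons_iff.mp hq with h | h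
    · simp [h, pvSum_cons, pvSum_nil, pvWt, hop]
    · simp at h; exact absurd h hne
  | @op c e1 e2 hop _ _ ih1 ih2 =>
    obtain ⟨hc1, hs1, ht1⟩ := ih1
    obtain ⟨hc2, hs2, ht2⟩ := ih2
    have hwt : pvWt c = -1 := by simp [pvWt, hop]
    refine ⟨?_, ?_, ?_⟩
    · intro d hd
      simp at hd
      rcases hd with h | h | h
      · simp [h, pvOk, hop]
      · exact hc1 d h
      · exact hc2 d h
    · intro q hq hne
      rcases List.suffix_cons_iff.mp hq with h | h
      · rw [h]
        rw [show (c :: e1.append e2 : List Char) = c :: (e1 ++ e2) from rfl,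
          pvSum_cons, pvSum_append, ht1, ht2, hwt]
        omega
      · -- q <:+ e1 ++ e2
        have hd := List.suffix_iff_eq_drop.mp h
        simp only [List.append_eq] at hd
        set j := (e1 ++ e2).length - q.length with hj
        rw [List.drop_append] at hd
        by_cases hle : j ≤ e1.length
        · -- q = e1.drop j ++ e2
          have hd2 : (e2 : List Char).drop (j - e1.length) = e2 := by
            have : j - e1.length = 0 := by omega
            simp [this]
          rw [hd2] at hd
          by_cases hemp : e1.drop j = []
          · rw [hemp] at hd; simp at hd
            subst hd
            rw [ht2]
          · have hq1 : 1 ≤ pvSum (e1.drop j) :=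
              hs1 _ (List.drop_suffix j e1) hemp
            rw [hd, pvSum_append, ht2]; omega
        · -- q is a suffix of e2
          have hd2 : (e1 : List Char).drop j = [] := by
            apply List.drop_eq_nil_of_le; omega
          rw [hd2] at hd; simp at hd
          have : q <:+ e2 := hd ▸ List.drop_suffix _ e2
          exact hs2 q this hne
    · rw [List.cons_append, pvSum_cons, pvSum_append, ht1, ht2, hwt]; omega

/-- discrete IVT: a list with weight-sum ≥ 1 has a suffix of sum exactly 1 -/
theorem exists_drop_sum_one : ∀ (l : List Char), 1 ≤ pvSum l →
    ∃ i, i ≤ l.length ∧ pvSum (l.drop i) = 1 := by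
  intro l
  induction l with
  | nil => intro h; rw [pvSum_nil] at h; omega
  | cons c l' ih =>
    intro h
    by_cases h1 : pvSum (c :: l') = 1
    · exact ⟨0, by omega, h1⟩
    · have hw : pvWt c = 1 ∨ pvWt c = -1 := by
        unfold pvWt; split <;> simp
      have : 1 ≤ pvSum l' := by rw [pvSum_cons] at h h1; omega
      obtain ⟨i, hi, hs⟩ := ih this
      exact ⟨i + 1, by simpa using hi, by simpa using hs⟩

theorem crit_PExpr : ∀ (n : Nat) (t : List Char), t.length ≤ n → Crit t → PExpr t := by
  intro n
  induction n with
  | zero =>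
    intro t hn hc
    have : t = [] := List.eq_nil_of_length_eq_zero (by omega)
    subst this
    exact absurd hc.2.2 (by rw [pvSum_nil]; omega)
  | succ n ih =>
    intro t hn ⟨hch, hsuf, htot⟩
    match t with
    | [] => exact absurd htot (by rw [pvSum_nil]; omega)
    | c :: rest =>
      by_cases hop : pvIsOp c = true
      · -- operator head: split rest = e1 ++ e2
        have hwt : pvWt c = -1 := by simp [pvWt, hop]
        have hrest2 : pvSum rest = 2 := by rw [pvSum_cons, hwt] at htot; omega
        obtain ⟨i0, hi0, hs0⟩ := exists_drop_sum_one rest (by omega)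
        -- least such index
        have hex : ∃ i, pvSum (rest.drop i) = 1 := ⟨i0, hs0⟩
        set i := Nat.find hex with hidef
        have hsi : pvSum (rest.drop i) = 1 := Nat.find_spec hex
        have hmin : ∀ j, j < i → pvSum (rest.drop j) ≠ 1 := fun j hj => Nat.find_min hex hj
        have hipos : 0 < i := by
          rcases Nat.eq_zero_or_pos i with h | h
          · exfalso; rw [h] at hsi; simp at hsi; omega
          · exact h
        have hile : i ≤ rest.length := by
          by_contra hgt
          rw [List.drop_eq_nil_of_le (by omega)] at hsi
          rw [pvSum_nil] at hsi; omega
        set e1 := rest.take i with he1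
        set e2 := rest.drop i with he2
        have hsplit : rest = e1 ++ e2 := (List.take_append_drop i rest).symm
        have hlen1 : e1.length = i := by simp [he1]; omega
        have hsum1 : pvSum e1 = 1 := by
          have := pvSum_append e1 e2
          rw [← hsplit, hrest2] at this
          omega
        -- e2 is a valid expression
        have hp2 : PExpr e2 := by
          apply ih e2 (by simp [he2]; simp at hn; omega)
          refine ⟨fun d hd => hch d (by rw [hsplit]; exact List.mem_cons_of_mem _ (List.mem_append_right _ hd)), ?_, hsi⟩
          intro q hq hne
          exact hsuf q (hq.trans ((List.drop_suffix i rest).trans (List.suffix_cons c rest))) hne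
        -- e1 is a valid expression
        have hp1 : PExpr e1 := by
          apply ih e1 (by simp at hn; omega)
          refine ⟨fun d hd => hch d (by rw [hsplit]; exact List.mem_cons_of_mem _ (List.mem_append_left _ hd)), ?_, hsum1⟩
          intro q hq hne
          have hd := List.suffix_iff_eq_drop.mp hq
          set j := e1.length - q.length with hj
          have hjlt : j < i := by
            have hqpos : 0 < q.length := List.length_pos_of_ne_nil hne
            have := hq.length_le
            omega
          have hqe : q ++ e2 = rest.drop j := by
            rw [hsplit, List.drop_append, ← hd]
            have h0 : j - e1.length = 0 := by omega
            rw [h0, List.drop_zero]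
          have hge : 1 ≤ pvSum (rest.drop j) := by
            apply hsuf
            · exact (List.drop_suffix j rest).trans (List.suffix_cons c rest)
            · intro hnil
              rw [hnil] at hqe
              exact hne (List.append_eq_nil_iff.mp hqe).1
          have hne1 : pvSum (rest.drop j) ≠ 1 := hmin j hjlt
          have : pvSum q + pvSum e2 = pvSum (rest.drop j) := by
            rw [← pvSum_append, hqe]
          omega
        have : (c :: rest) = c :: e1 ++ e2 := by rw [hsplit]; rfl
        rw [this]
        exact PExpr.op hop hp1 hp2
      · -- operand head: rest must be empty
        have hop' : pvIsOp c = false := by simpa using hop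
        have hup : PySem.Chars.isupper c = true := by
          have := hch c (by simp)
          simpa [pvOk, hop'] using this
        have hwt : pvWt c = 1 := by simp [pvWt, hop']
        have hrest0 : pvSum rest = 0 := by rw [pvSum_cons, hwt] at htot; omega
        have hrestnil : rest = [] := by
          by_contra hne
          have := hsuf rest (List.suffix_cons c rest) hne
          omega
        subst hrestnil
        exact PExpr.up hop' hup

-- ---------- A side: counter loop ↔ prefix-sum criterion ----------

theorem proveriLoop_cons (c : Char) (rest : List Char) (b : Int) :
    proveriLoop (c :: rest) b =
      if (c == '+' || c == '-' || c == '/' || c == '*') = true then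
        if b - 2 < 0 then false else proveriLoop rest (b - 2 + 1)
      else if PySem.Chars.isupper c = true then proveriLoop rest (b + 1)
      else false := rfl

theorem proveriLoop_iff : ∀ (cs : List Char) (b : Int), 0 ≤ b →
    (proveriLoop cs b = true ↔
      ((∀ c ∈ cs, pvOk c = true) ∧ (∀ p, p <+: cs → p ≠ [] → 1 ≤ b + pvSum p) ∧
        b + pvSum cs = 1)) := by
  intro cs
  induction cs with
  | nil =>
    intro b _
    simp only [proveriLoop, pvSum_nil]
    constructor
    · intro h
      refine ⟨by simp, ?_, ?_⟩
      · intro p hp hne; exact absurd (List.prefix_nil.mp hp) hne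
      · have : b = 1 := by simpa using h
        omega
    · rintro ⟨-, -, h⟩
      have : b = 1 := by omega
      simp [this]
  | cons c rest ih =>
    intro b hb
    by_cases hop : (c == '+' || c == '-' || c == '/' || c == '*') = true
    · have hisop : pvIsOp c = true := by simpa [pvIsOp] using hop
      have hwt : pvWt c = -1 := by simp [pvWt, hisop]
      by_cases hlt : b - 2 < 0
      · -- A returns False; criterion fails at prefix [c]
        rw [proveriLoop_cons, if_pos hop, if_pos hlt]
        constructor
        · intro h; simp at h
        · rintro ⟨-, hpre, -⟩
          have := hpre [c] (by simp) (by simp)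
          rw [pvSum_cons, pvSum_nil, hwt] at this
          omega
      · rw [proveriLoop_cons, if_pos hop, if_neg hlt]
        rw [ih (b - 2 + 1) (by omega)]
        constructor
        · rintro ⟨hch, hpre, htot⟩
          refine ⟨?_, ?_, ?_⟩
          · intro d hd
            rcases List.mem_cons.mp hd with h | h
            · simp [h, pvOk, hisop]
            · exact hch d h
          · intro p hp hne
            rcases List.prefix_cons_iff.mp hp with h | ⟨p', hp', hp''⟩
            · exact absurd h hne
            · subst hp'
              rw [pvSum_cons, hwt]
              by_cases hpe : p' = []
              · subst hpe; rw [pvSum_nil]; omega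
              · have := hpre p' hp'' hpe
                omega
          · rw [pvSum_cons, hwt]; omega
        · rintro ⟨hch, hpre, htot⟩
          refine ⟨fun d hd => hch d (by simp [hd]), ?_, ?_⟩
          · intro p' hp' hne
            have := hpre (c :: p') (by simpa using hp') (by simp)
            rw [pvSum_cons, hwt] at this
            omega
          · rw [pvSum_cons, hwt] at htot; omega
    · by_cases hup : PySem.Chars.isupper c = true
      · have hisop : pvIsOp c = false := by simpa [pvIsOp] using hop
        have hwt : pvWt c = 1 := by simp [pvWt, hisop]
        rw [proveriLoop_cons, if_neg hop, if_pos hup]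
        rw [ih (b + 1) (by omega)]
        constructor
        · rintro ⟨hch, hpre, htot⟩
          refine ⟨?_, ?_, ?_⟩
          · intro d hd
            rcases List.mem_cons.mp hd with h | h
            · simp [h, pvOk, hup]
            · exact hch d h
          · intro p hp hne
            rcases List.prefix_cons_iff.mp hp with h | ⟨p', hp', hp''⟩
            · exact absurd h hne
            · subst hp'
              rw [pvSum_cons, hwt]
              by_cases hpe : p' = []
              · subst hpe; rw [pvSum_nil]; omega
              · have := hpre p' hp'' hpe
                omega
          · rw [pvSum_cons, hwt]; omega
        · rintro ⟨hch, hpre, htot⟩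
          refine ⟨fun d hd => hch d (by simp [hd]), ?_, ?_⟩
          · intro p' hp' hne
            have := hpre (c :: p') (by simpa using hp') (by simp)
            rw [pvSum_cons, hwt] at this
            omega
          · rw [pvSum_cons, hwt] at htot; omega
      · -- invalid char: both sides false
        rw [proveriLoop_cons, if_neg hop, if_neg hup]
        constructor
        · intro h; simp at h
        · rintro ⟨hch, -, -⟩
          have h1 := hch c (by simp)
          have h2 : pvIsOp c = false := by simpa [pvIsOp] using hop
          have h3 : PySem.Chars.isupper c = false := by simpa using hup
          simp [pvOk, h2, h3] at h1

/-- A's criterion on cs equals B's criterion on cs.reverse -/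
theorem crit_reverse (cs : List Char) :
    (((∀ c ∈ cs, pvOk c = true) ∧ (∀ p, p <+: cs → p ≠ [] → 1 ≤ (0:Int) + pvSum p) ∧
      (0:Int) + pvSum cs = 1)) ↔ Crit cs.reverse := by
  unfold Crit
  constructor
  · rintro ⟨hch, hpre, htot⟩
    refine ⟨fun d hd => hch d (by simpa using hd), ?_, by rw [pvSum_reverse]; omega⟩
    intro q hq hne
    have hq' : q.reverse <+: cs := by
      rw [← List.reverse_reverse cs]
      exact List.reverse_prefix.mpr (by simpa using hq)
    have := hpre q.reverse hq' (by simpa using hne)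
    rw [pvSum_reverse] at this
    omega
  · rintro ⟨hch, hsuf, htot⟩
    refine ⟨fun d hd => hch d (by simpa using hd), ?_, by rw [pvSum_reverse] at htot; omega⟩
    intro p hp hne
    have hp' : p.reverse <:+ cs.reverse := List.reverse_suffix.mpr hp
    have := hsuf p.reverse hp' (by simpa using hne)
    rw [pvSum_reverse] at this
    omega

-- ===== VERDICT (by name: the statement is the Claim_ definition above) =====
theorem proveri_spec : Claim_equal_proveri := by
  intro s _
  unfold Spec_proveri proveri proveri_alt
  rw [Bool.eq_iff_iff]
  rw [beq_iff_eq, parseB_iff_PExpr]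
  rw [proveriLoop_iff s.toList 0 (by omega), crit_reverse]
  constructor
  · intro h
    exact crit_PExpr s.toList.reverse.length _ (le_refl _) h
  · intro h
    exact PExpr_crit _ h
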